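-- pv_equiv track=rewrite | github.com/luk036/gray-code | src/middle_ai.py | min_string_rotation
-- ===== SOURCE A (Python) =====
-- from typing import List, Tuple, Callable, Optional
--
-- def min_string_rotation(x: List[int]) -> int:
--     xx = x + x
--     fail = [-1] * (2 * len(x))
--     k = 0
--
--     for j in range(1, 2 * len(x)):
--         xj = xx[j]
--         i = fail[j - k - 1]
--
--         while i != -1 and xj != xx[k + i + 1]:
--             if xj < xx[k + i + 1]:
--                 k = j - i - 1
--             i = fail[i]
--
--         if xj != xx[k + i + 1]:
--             if xj < xx[k]:
--                 k = j
--             fail[j - k] = -1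
--         else:
--             fail[j - k] = i + 1
--     return k
-- ===== SOURCE B (Python) =====
-- def min_string_rotation(x):
--     n = len(x)
--     best = 0
--     for i in range(1, n):
--         if x[i:] + x[:i] < x[best:] + x[:best]:
--             best = i
--     return best
-- ===== Notes on version B (the rewrite author's own statement) =====
-- stated objective: simpler
-- what changed: Replaces Booth's single-pass failure-table algorithm with a direct scan that keeps the index of the lexicographically smallest rotation seen so far, comparing full rotations x[i:]+x[:i]; strict '<' keeps the earliest index on ties, matching Booth's least-index choice.
import Mathlib
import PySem

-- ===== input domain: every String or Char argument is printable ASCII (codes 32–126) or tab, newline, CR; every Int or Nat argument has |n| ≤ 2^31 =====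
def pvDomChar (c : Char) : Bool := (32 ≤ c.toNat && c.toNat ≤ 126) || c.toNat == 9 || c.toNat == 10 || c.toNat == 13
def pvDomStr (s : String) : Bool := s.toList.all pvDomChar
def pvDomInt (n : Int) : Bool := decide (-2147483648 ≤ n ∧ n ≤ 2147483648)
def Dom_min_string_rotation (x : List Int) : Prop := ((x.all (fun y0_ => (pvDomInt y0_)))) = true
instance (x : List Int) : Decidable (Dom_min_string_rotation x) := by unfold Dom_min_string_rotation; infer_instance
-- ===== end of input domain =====

-- B replaces Booth's O(n) failure-table pass with a direct keep-the-best scan over all rotations (simpler, O(n^2)); return values agree on every input.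

-- ===== PORT A =====
-- Booth's algorithm, transliterated.  The inner `while` is ported as fuel
-- recursion; fuel 2*len(x)+2 is proved sufficient in the lemmas below
-- (the chain value i strictly decreases and starts below 2*len(x)).
def pvWhileA (xx : List Int) (j xj : Int) (fail : List Int) : ℕ → Int × Int → Int × Int
  | 0, st => st
  | fuel+1, (k, i) =>
    if i ≠ -1 ∧ xj ≠ PySem.List.pyGetD xx (k + i + 1) 0 then
      pvWhileA xx j xj fail fuel
        ((if xj < PySem.List.pyGetD xx (k + i + 1) 0 then j - i - 1 else k),
         PySem.List.pyGetD fail i 0)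
    else (k, i)

def pvStepA (xx : List Int) (n2 : ℕ) (st : List Int × Int) (j : Int) : List Int × Int :=
  let fail := st.1
  let k0 := st.2
  let xj := PySem.List.pyGetD xx j 0
  let i0 := PySem.List.pyGetD fail (j - k0 - 1) 0
  let p := pvWhileA xx j xj fail (n2 + 2) (k0, i0)
  let k := p.1
  let i := p.2
  if xj ≠ PySem.List.pyGetD xx (k + i + 1) 0 then
    let k' := if xj < PySem.List.pyGetD xx k 0 then j else k
    (PySem.List.pySetD fail (j - k') (-1), k')
  else
    (PySem.List.pySetD fail (j - k) (i + 1), k)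

def min_string_rotation (x : List Int) : Int :=
  let xx := x ++ x
  ((PySem.List.pyRange 1 (2 * (x.length : Int)) 1).foldl
    (pvStepA xx (2 * x.length))
    (List.replicate (2 * x.length) (-1), 0)).2

-- ===== PORT B =====
-- Python list `<` on two int lists (lexicographic, shorter-prefix-is-smaller).
def pyListLt : List Int → List Int → Bool
  | _, [] => false
  | [], _ :: _ => true
  | a :: u, b :: v => if a < b then true else if b < a then false else pyListLt u v

-- x[i:] + x[:i]
def pvRot (x : List Int) (i : Int) : List Int :=
  PySem.List.slice x (some i) none ++ PySem.List.slice x none (some i)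

def min_string_rotation_alt (x : List Int) : Int :=
  (PySem.List.pyRange 1 (x.length : Int) 1).foldl
    (fun best i => if pyListLt (pvRot x i) (pvRot x best) then i else best) 0

-- ===== PRECONDITION & SPEC =====
def Spec_min_string_rotation (x : List Int) (out : Int) : Prop := out = min_string_rotation_alt x
instance (x : List Int) (out : Int) : Decidable (Spec_min_string_rotation x out) := by unfold Spec_min_string_rotation; infer_instance

-- ===== CLAIM (what is proved, stated in full; the proofs are below) =====
def Claim_equal_min_string_rotation : Prop := ∀ (x : List Int), Dom_min_string_rotation x → Spec_min_string_rotation x (min_string_rotation x)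

-- ===== LEMMAS AND PROOFS =====

-- The doubled sequence as a total function: s t = (x ++ x)[t] (junk 0 beyond 2n).
def pvS (x : List Int) : ℕ → Int := fun t => (x ++ x).getD t 0

-- "window at l beats window at m at time e, by a strict character difference at t"
-- (windows are s[l..e) and s[m..e)).
def pvCharLt (s : ℕ → Int) (e l m t : ℕ) : Prop :=
  l + t < e ∧ m + t < e ∧ (∀ u, u < t → s (l + u) = s (m + u)) ∧ s (l + t) < s (m + t)

-- Strict order on windows: lexicographic, and on prefix-exhaustion the LONGER
-- window (smaller start index) is smaller.
def pvSlt (s : ℕ → Int) (e l m : ℕ) : Prop :=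
  (∃ t, pvCharLt s e l m t) ∨ (l < m ∧ ∀ u, m + u < e → s (l + u) = s (m + u))

-- k is the unique pvSlt-minimum among all windows s[l..e), l < e.
def pvBest (s : ℕ → Int) (e k : ℕ) : Prop :=
  k < e ∧ ∀ l, l < e → l ≠ k → pvSlt s e k l

-- b is a (possibly empty) proper border of the window s[k..e).
@[reducible] def pvBord (s : ℕ → Int) (k e b : ℕ) : Prop :=
  b < e - k ∧ ∀ u, u < b → s (k + u) = s (e - b + u)

-- longest proper border of s[k..e)
def pvBrd (s : ℕ → Int) (k e : ℕ) : ℕ := Nat.findGreatest (pvBord s k e) (e - k - 1)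

-- ---------- order lemmas ----------


theorem pvSlt_total (s : ℕ → Int) (e l m : ℕ) (hl : l < e) (hm : m < e) (hne : l ≠ m) :
    pvSlt s e l m ∨ pvSlt s e m l := by
  classical
  rcases Nat.lt_trichotomy l m with hlm | hlm | hlm
  · by_cases hex : ∃ u, m + u < e ∧ s (l + u) ≠ s (m + u)
    · have hspec := Nat.find_spec hex
      have hpre : ∀ u, u < Nat.find hex → s (l + u) = s (m + u) := by
        intro u hu
        have hmin := Nat.find_min hex hu
        by_contra hne2
        exact hmin ⟨by omega, hne2⟩
      rcases lt_or_gt_of_ne hspec.2 with h | h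
      · exact Or.inl (Or.inl ⟨Nat.find hex, by omega, hspec.1, hpre, h⟩)
      · exact Or.inr (Or.inl ⟨Nat.find hex, hspec.1, by omega, fun u hu => (hpre u hu).symm, h⟩)
    · push_neg at hex
      exact Or.inl (Or.inr ⟨hlm, hex⟩)
  · exact absurd hlm hne
  · by_cases hex : ∃ u, l + u < e ∧ s (m + u) ≠ s (l + u)
    · have hspec := Nat.find_spec hex
      have hpre : ∀ u, u < Nat.find hex → s (m + u) = s (l + u) := by
        intro u hu
        have hmin := Nat.find_min hex hu
        by_contra hne2
        exact hmin ⟨by omega, hne2⟩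
      rcases lt_or_gt_of_ne hspec.2 with h | h
      · exact Or.inr (Or.inl ⟨Nat.find hex, by omega, hspec.1, hpre, h⟩)
      · exact Or.inl (Or.inl ⟨Nat.find hex, hspec.1, by omega, fun u hu => (hpre u hu).symm, h⟩)
    · push_neg at hex
      exact Or.inr (Or.inr ⟨hlm, hex⟩)

theorem pvSlt_asymm (s : ℕ → Int) (e l m : ℕ) (h : pvSlt s e l m) : ¬ pvSlt s e m l := by
  intro h'
  rcases h with ⟨t1, hl1, hm1, hp1, hlt1⟩ | ⟨hlm, hp1⟩ <;>
    rcases h' with ⟨t2, hl2, hm2, hp2, hlt2⟩ | ⟨hml, hp2⟩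
  · rcases Nat.lt_trichotomy t1 t2 with h | h | h
    · exact absurd (hp2 t1 h) (ne_of_gt hlt1)
    · subst h; exact absurd (hlt1.trans hlt2) (lt_irrefl _)
    · exact absurd (hp1 t2 h) (ne_of_gt hlt2)
  · exact absurd (hp2 t1 hl1) (ne_of_gt hlt1)
  · exact absurd (hp1 t2 hl2) (ne_of_gt hlt2)
  · omega

theorem pvSlt_trans (s : ℕ → Int) (e a b c : ℕ)
    (h1 : pvSlt s e a b) (h2 : pvSlt s e b c) : pvSlt s e a c := by
  rcases h1 with ⟨t1, ha1, hb1, hp1, hlt1⟩ | ⟨hab, hp1⟩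
  · rcases h2 with ⟨t2, hb2, hc2, hp2, hlt2⟩ | ⟨hbc, hp2⟩
    · rcases Nat.lt_trichotomy t1 t2 with h | h | h
      · exact Or.inl ⟨t1, ha1, by omega, fun u hu => (hp1 u hu).trans (hp2 u (by omega)), by
          rw [← hp2 t1 h]; exact hlt1⟩
      · subst h
        exact Or.inl ⟨t1, ha1, hc2, fun u hu => (hp1 u hu).trans (hp2 u hu), hlt1.trans hlt2⟩
      · exact Or.inl ⟨t2, by omega, hc2, fun u hu => (hp1 u (by omega)).trans (hp2 u hu), by
          rw [hp1 t2 h]; exact hlt2⟩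
    · by_cases hct : c + t1 < e
      · exact Or.inl ⟨t1, ha1, hct, fun u hu => (hp1 u hu).trans (hp2 u (by omega)), by
          rw [← hp2 t1 hct]; exact hlt1⟩
      · have hac : a < c := by omega
        refine Or.inr ⟨hac, fun u hu => ?_⟩
        have hut : u < t1 := by omega
        exact (hp1 u hut).trans (hp2 u hu)
  · rcases h2 with ⟨t2, hb2, hc2, hp2, hlt2⟩ | ⟨hbc, hp2⟩
    · exact Or.inl ⟨t2, by omega, hc2, fun u hu => (hp1 u (by omega)).trans (hp2 u hu), by
        rw [hp1 t2 hb2]; exact hlt2⟩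
    · exact Or.inr ⟨by omega, fun u hu => (hp1 u (by omega)).trans (hp2 u hu)⟩

theorem pvBest_unique (s : ℕ → Int) (e k k' : ℕ)
    (h1 : pvBest s e k) (h2 : pvBest s e k') : k = k' := by
  by_contra hne
  exact pvSlt_asymm s e k k' (h1.2 k' h2.1 (Ne.symm hne))
    (h2.2 k h1.1 hne)

-- ---------- border lemmas ----------

theorem pvBord_zero (s : ℕ → Int) (k e : ℕ) (h : k < e) : pvBord s k e 0 := by
  exact ⟨by omega, fun u hu => by omega⟩

-- border of border: both directions
theorem pvBord_of_prefix (s : ℕ → Int) (k e b b' : ℕ)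
    (hb : pvBord s k e b) (hb' : pvBord s k (k + b) b') : pvBord s k e b' := by
  obtain ⟨hb1, hb2⟩ := hb
  obtain ⟨hb1', hb2'⟩ := hb'
  have hb1'' : b' < b := by omega
  refine ⟨by omega, fun u hu => ?_⟩
  have h1 := hb2' u hu
  have h2 := hb2 (b - b' + u) (by omega)
  have e1 : k + b - b' + u = k + (b - b' + u) := by omega
  have e2 : e - b + (b - b' + u) = e - b' + u := by omega
  rw [e1] at h1
  rw [e2] at h2
  exact h1.trans h2

theorem pvBord_prefix_of_lt (s : ℕ → Int) (k e b b' : ℕ)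
    (hb : pvBord s k e b) (hb' : pvBord s k e b') (hlt : b' < b) : pvBord s k (k + b) b' := by
  obtain ⟨hb1, hb2⟩ := hb
  obtain ⟨hb1', hb2'⟩ := hb'
  refine ⟨by omega, fun u hu => ?_⟩
  have h1 := hb2' u hu
  have h2 := hb2 (b - b' + u) (by omega)
  have e1 : k + b - b' + u = k + (b - b' + u) := by omega
  have e2 : e - b + (b - b' + u) = e - b' + u := by omega
  rw [e1]
  rw [e2] at h2
  exact h1.trans h2.symm

theorem pvBrd_bord (s : ℕ → Int) (k e : ℕ) (h : k < e) : pvBord s k e (pvBrd s k e) := by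
  exact Nat.findGreatest_spec (Nat.zero_le _) (pvBord_zero s k e h)

theorem pvBrd_is_greatest (s : ℕ → Int) (k e b : ℕ) (hb : pvBord s k e b) : b ≤ pvBrd s k e := by
  exact Nat.le_findGreatest (by have := hb.1; omega) hb

theorem pvBrd_le (s : ℕ → Int) (k e : ℕ) : pvBrd s k e ≤ e - k - 1 := by
  unfold pvBrd
  exact Nat.findGreatest_le (P := pvBord s k e) (n := e - k - 1)

-- extending a window by one char: borders of s[k..e+1)
theorem pvBord_succ_elim (s : ℕ → Int) (k e b : ℕ) (hb : pvBord s k (e+1) (b+1)) :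
    pvBord s k e b ∧ s (k + b) = s e := by
  obtain ⟨hb1, hb2⟩ := hb
  refine ⟨⟨by omega, fun u hu => ?_⟩, ?_⟩
  · have := hb2 u (by omega)
    have e1 : e + 1 - (b + 1) + u = e - b + u := by omega
    rwa [e1] at this
  · have := hb2 b (by omega)
    have e1 : e + 1 - (b + 1) + b = e := by omega
    rwa [e1] at this

theorem pvBord_succ_intro (s : ℕ → Int) (k e b : ℕ) (hb : pvBord s k e b)
    (hc : s (k + b) = s e) (hlen : b + 1 < e + 1 - k) : pvBord s k (e+1) (b+1) := by
  obtain ⟨hb1, hb2⟩ := hb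
  refine ⟨hlen, fun u hu => ?_⟩
  have e1 : e + 1 - (b + 1) + u = e - b + u := by omega
  rw [e1]
  rcases Nat.lt_or_ge u b with h | h
  · exact hb2 u h
  · have hub : u = b := by omega
    have e2 : e - b + u = e := by omega
    rw [e2, hub]; exact hc

-- windows with identical characters have identical borders / failure values
theorem pvBord_congr (s : ℕ → Int) (k k' L t b : ℕ)
    (hcopy : ∀ u, u < L → s (k + u) = s (k' + u)) (ht : t ≤ L) :
    pvBord s k (k + t) b ↔ pvBord s k' (k' + t) b := by
  have key : ∀ a a' : ℕ, (∀ u, u < L → s (a + u) = s (a' + u)) →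
      pvBord s a (a + t) b → pvBord s a' (a' + t) b := by
    rintro a a' hc ⟨h1, h2⟩
    refine ⟨by omega, fun u hu => ?_⟩
    have hbt : b < t := by omega
    have e1 : a + t - b + u = a + (t - b + u) := by omega
    have e2 : a' + t - b + u = a' + (t - b + u) := by omega
    calc s (a' + u) = s (a + u) := (hc u (by omega)).symm
      _ = s (a + t - b + u) := h2 u hu
      _ = s (a + (t - b + u)) := by rw [e1]
      _ = s (a' + (t - b + u)) := hc _ (by omega)
      _ = s (a' + t - b + u) := by rw [e2]
  exact ⟨key k k' hcopy, key k' k (fun u hu => (hcopy u hu).symm)⟩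

theorem pvBrd_congr (s : ℕ → Int) (k k' L t : ℕ)
    (hcopy : ∀ u, u < L → s (k + u) = s (k' + u)) (ht : t ≤ L) :
    pvBrd s k (k + t) = pvBrd s k' (k' + t) := by
  unfold pvBrd
  have hP : pvBord s k (k + t) = pvBord s k' (k' + t) := by
    funext b
    exact propext (pvBord_congr s k k' L t b hcopy ht)
  have e1 : k + t - k - 1 = t - 1 := by omega
  have e2 : k' + t - k' - 1 = t - 1 := by omega
  rw [e1, e2]
  congr 1


-- convenience introduction forms for pvSlt
theorem pvSlt_of_char (s : ℕ → Int) (e k1 l t : ℕ) (h1 : k1 + t < e) (h2 : l + t < e)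
    (hpre : ∀ u, u < t → s (k1 + u) = s (l + u)) (hlt : s (k1 + t) < s (l + t)) :
    pvSlt s e k1 l := Or.inl ⟨t, h1, h2, hpre, hlt⟩

theorem pvSlt_of_pref (s : ℕ → Int) (e k1 l : ℕ) (hkl : k1 < l)
    (hpre : ∀ u, l + u < e → s (k1 + u) = s (l + u)) : pvSlt s e k1 l := Or.inr ⟨hkl, hpre⟩

theorem pvS_pyGetD (x : List Int) (t : ℕ) :
    PySem.List.pyGetD (x ++ x) ((t : ℕ) : Int) 0 = pvS x t := by
  simp [PySem.List.pyGetD_natCast, pvS]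

-- ---------- the outer invariant ----------

def pvAInv (s : ℕ → Int) (N j : ℕ) (st : List Int × Int) : Prop :=
  ∃ kN : ℕ, st.2 = (kN : Int) ∧ kN < j ∧ st.1.length = N ∧
    (∀ t, t < j - kN → st.1.getD t 0 = (pvBrd s kN (kN + t + 1) : Int) - 1) ∧
    pvBest s j kN

-- ---------- inner loop ----------

-- the inner-loop invariant, relative to the best index k0 entering iteration j
def pvInnerInv (s : ℕ → Int) (j k0 : ℕ) (k i : Int) : Prop :=
  (i = -1 ∨ (0 ≤ i ∧ pvBord s k0 j (i.toNat + 1))) ∧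
  (∀ b : ℕ, pvBord s k0 j b → i + 1 < (b : Int) → s j ≠ s (k0 + b)) ∧
  ((k = (k0 : Int) ∧ ∀ b : ℕ, pvBord s k0 j b → i + 1 < (b : Int) → s (k0 + b) < s j) ∨
   (∃ bm : ℕ, pvBord s k0 j bm ∧ i + 1 < (bm : Int) ∧ k = (j : Int) - bm ∧
      s j < s (k0 + bm) ∧
      ∀ b : ℕ, pvBord s k0 j b → i + 1 < (b : Int) → b < bm → s (k0 + b) < s j))


-- the current k of the inner loop, as a natural number whose window is a
-- prefix-copy of the window at k0
theorem pvInner_kchar (s : ℕ → Int) (j k0 : ℕ) (k i : Int) (hk0 : k0 < j)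
    (hinv : pvInnerInv s j k0 k i) :
    ∃ kN : ℕ, k = (kN : Int) ∧ k0 ≤ kN ∧ kN < j ∧
      ∀ u : ℕ, (u : Int) ≤ i + 1 → s (kN + u) = s (k0 + u) := by
  have hige : i = -1 ∨ 0 ≤ i := by
    rcases hinv.1 with h | ⟨h, -⟩
    · exact Or.inl h
    · exact Or.inr h
  rcases hinv.2.2 with ⟨hk, _⟩ | ⟨bm, hbm, hibm, hk, _, _⟩
  · exact ⟨k0, hk, le_refl _, hk0, fun u _ => rfl⟩
  · have hbmj : bm < j - k0 := hbm.1
    refine ⟨j - bm, by rw [hk]; omega, by omega, by omega, fun u hu => ?_⟩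
    have hu' : u < bm := by omega
    exact (hbm.2 u hu').symm

-- what the inner loop returns
theorem pvWhileA_post (x : List Int) (j k0 : ℕ) (fail : List Int) (fuel : ℕ)
    (k i : Int)
    (hk0 : k0 < j) (hj : j < 2 * x.length)
    (hfl : fail.length = 2 * x.length)
    (hfail : ∀ t, t < j - k0 → fail.getD t 0 = (pvBrd (pvS x) k0 (k0 + t + 1) : Int) - 1)
    (hinv : pvInnerInv (pvS x) j k0 k i)
    (hfuel : i + 1 < (fuel : Int))
    (hib : i < (j : Int) - k0 - 1) :
    ∃ k' i' : Int,
      pvWhileA (x ++ x) (j : Int) (pvS x j) fail fuel (k, i) = (k', i') ∧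
      pvInnerInv (pvS x) j k0 k' i' ∧ i' < (j : Int) - k0 - 1 ∧
      (i' = -1 ∨ (0 ≤ i' ∧ pvS x j = pvS x (k0 + i'.toNat + 1))) := by
  induction fuel generalizing k i with
  | zero =>
    exfalso
    rcases hinv.1 with h | ⟨h, _⟩ <;> omega
  | succ fuel ih =>
    rcases hinv.1 with hi1 | ⟨hi0, hibord⟩
    · refine ⟨k, i, ?_, hinv, hib, Or.inl hi1⟩
      simp only [pvWhileA]
      rw [if_neg]
      rintro ⟨hne, -⟩
      exact hne hi1
    · have hiI : i = (i.toNat : Int) := by omega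
      set iN := i.toNat with hiN
      obtain ⟨kN, hkN, hk0k, hkj, hcopy⟩ := pvInner_kchar (pvS x) j k0 k i hk0 hinv
      have hcont : PySem.List.pyGetD (x ++ x) (k + i + 1) 0 = pvS x (k0 + iN + 1) := by
        have h1 : k + i + 1 = ((kN + iN + 1 : ℕ) : Int) := by rw [hkN, hiI]; push_cast; ring
        rw [h1, pvS_pyGetD]
        have h2 := hcopy (iN + 1) (by omega)
        have e1 : kN + (iN + 1) = kN + iN + 1 := by omega
        have e2 : k0 + (iN + 1) = k0 + iN + 1 := by omega
        rw [e1, e2] at h2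
        exact h2
      by_cases hm : pvS x j = pvS x (k0 + iN + 1)
      · refine ⟨k, i, ?_, hinv, hib, Or.inr ⟨hi0, by rw [← hiN]; exact hm⟩⟩
        simp only [pvWhileA]
        rw [if_neg]
        rintro ⟨-, hne⟩
        rw [hcont] at hne
        exact hne hm
      · -- mismatch: execute one loop step
        have hbordiN : pvBord (pvS x) k0 j (iN + 1) := hibord
        have hiNlt : iN < j - k0 := by have := hbordiN.1; omega
        have hfi : fail.getD iN 0 = (pvBrd (pvS x) k0 (k0 + iN + 1) : Int) - 1 := hfail iN hiNlt
        set B2 := pvBrd (pvS x) k0 (k0 + iN + 1) with hB2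
        have hB2le : B2 ≤ iN := by
          have h := pvBrd_le (pvS x) k0 (k0 + iN + 1)
          omega
        have hB2bord : pvBord (pvS x) k0 (k0 + iN + 1) B2 := pvBrd_bord _ _ _ (by omega)
        have hB2bordj : pvBord (pvS x) k0 j B2 := by
          rcases Nat.eq_zero_or_pos B2 with h0 | hpos
          · rw [h0]; exact pvBord_zero _ _ _ hk0
          · refine pvBord_of_prefix (pvS x) k0 j (iN + 1) B2 hbordiN ?_
            have e1 : k0 + (iN + 1) = k0 + iN + 1 := by omega
            rw [e1]; exact hB2bord
        have hnogap : ∀ b : ℕ, pvBord (pvS x) k0 j b → B2 < b → b < iN + 1 → False := by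
          intro b hb hlb hub
          have h1 : pvBord (pvS x) k0 (k0 + (iN + 1)) b :=
            pvBord_prefix_of_lt (pvS x) k0 j (iN + 1) b hbordiN hb hub
          have h2 : b ≤ B2 := by
            have e1 : k0 + (iN + 1) = k0 + iN + 1 := by omega
            rw [e1] at h1
            exact pvBrd_is_greatest _ _ _ _ h1
          omega
        have hmm2 : ∀ b : ℕ, pvBord (pvS x) k0 j b → (B2 : Int) - 1 + 1 < (b : Int) →
            pvS x j ≠ pvS x (k0 + b) := by
          intro b hb hgt
          rcases Nat.lt_trichotomy b (iN + 1) with h | h | h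
          · exact (hnogap b hb (by omega) h).elim
          · subst h
            intro heq
            apply hm
            have e1 : k0 + (iN + 1) = k0 + iN + 1 := by omega
            rw [e1] at heq
            exact heq
          · exact hinv.2.1 b hb (by omega)
        have hgt : ¬ pvS x j < pvS x (k0 + iN + 1) → pvS x (k0 + iN + 1) < pvS x j := by
          intro h
          exact lt_of_le_of_ne (not_lt.mp h) (fun e => hm e.symm)
        have hinv' : pvInnerInv (pvS x) j k0
            (if pvS x j < pvS x (k0 + iN + 1) then (j : Int) - i - 1 else k) ((B2 : Int) - 1) := by
          refine ⟨?_, ?_, ?_⟩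
          · rcases Nat.eq_zero_or_pos B2 with h0 | hpos
            · left; rw [h0]; norm_num
            · right
              refine ⟨by omega, ?_⟩
              have e : ((B2 : Int) - 1).toNat + 1 = B2 := by omega
              rw [e]
              exact hB2bordj
          · exact hmm2
          · by_cases hlt : pvS x j < pvS x (k0 + iN + 1)
            · rw [if_pos hlt]
              refine Or.inr ⟨iN + 1, hbordiN, by omega, by rw [hiI]; push_cast; ring, ?_, ?_⟩
              · have e1 : k0 + (iN + 1) = k0 + iN + 1 := by omega
                rw [e1]; exact hlt
              · intro b hb h1 h2
                exact (hnogap b hb (by omega) (by omega)).elim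
            · rw [if_neg hlt]
              have hgt' := hgt hlt
              rcases hinv.2.2 with ⟨hk, hall⟩ | ⟨bm, hbm, hibm, hk, hsm, hextra⟩
              · refine Or.inl ⟨hk, fun b hb hgtb => ?_⟩
                rcases Nat.lt_trichotomy b (iN + 1) with h | h | h
                · exact (hnogap b hb (by omega) h).elim
                · subst h
                  have e1 : k0 + (iN + 1) = k0 + iN + 1 := by omega
                  rw [e1]; exact hgt'
                · exact hall b hb (by omega)
              · refine Or.inr ⟨bm, hbm, by omega, hk, hsm, fun b hb h1 h2 => ?_⟩
                rcases Nat.lt_trichotomy b (iN + 1) with h | h | h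
                · exact (hnogap b hb (by omega) h).elim
                · subst h
                  have e1 : k0 + (iN + 1) = k0 + iN + 1 := by omega
                  rw [e1]; exact hgt'
                · exact hextra b hb (by omega) h2
        obtain ⟨k', i', heq, hpost1, hpost2, hpost3⟩ :=
          ih _ _ hinv' (by omega) (by omega)
        refine ⟨k', i', ?_, hpost1, hpost2, hpost3⟩
        have hstep : pvWhileA (x ++ x) (j : Int) (pvS x j) fail (fuel + 1) (k, i) =
            pvWhileA (x ++ x) (j : Int) (pvS x j) fail fuel
              ((if pvS x j < PySem.List.pyGetD (x ++ x) (k + i + 1) 0 then (j : Int) - i - 1 else k),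
               PySem.List.pyGetD fail i 0) := by
          simp only [pvWhileA]
          rw [if_pos]
          constructor
          · omega
          · rw [hcont]; exact hm
        rw [hstep, hcont]
        have hfi2 : PySem.List.pyGetD fail i 0 = (B2 : Int) - 1 := by
          rw [hiI, PySem.List.pyGetD_natCast]
          exact hfi
        rw [hfi2]
        exact heq


-- ---------- lemmas for the per-iteration step ----------

theorem pvSetD_length (xs : List Int) (nN : ℕ) (v : Int) :
    (PySem.List.pySetD xs ((nN : ℕ) : Int) v).length = xs.length := by
  rw [PySem.List.pySetD_natCast]
  exact List.length_set

theorem pvSetD_getD (xs : List Int) (nN : ℕ) (v : Int) (t : ℕ) (h : nN < xs.length) :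
    (PySem.List.pySetD xs ((nN : ℕ) : Int) v).getD t 0 = if t = nN then v else xs.getD t 0 := by
  rw [PySem.List.pySetD_natCast]
  rw [List.getD_eq_getElem?_getD, List.getD_eq_getElem?_getD, List.getElem?_set]
  by_cases he : t = nN
  · subst he
    simp [h]
  · rw [if_neg (fun hh => he hh.symm), if_neg he]

-- a non-candidate (its window is not a suffix-copy of a prefix of the best
-- window) stays strictly beaten after the window grows by one character
theorem pvStep_noncand (s : ℕ → Int) (j k0 l : ℕ) (hbest : pvBest s j k0) (hl : l < j)
    (hlne : l ≠ k0) (hnb : ¬ pvBord s k0 j (j - l)) : pvSlt s (j+1) k0 l := by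
  rcases hbest.2 l hl hlne with ⟨t, h1, h2, h3, h4⟩ | ⟨hlt, hpre⟩
  · exact Or.inl ⟨t, by omega, by omega, h3, h4⟩
  · exfalso
    apply hnb
    refine ⟨by omega, fun u hu => ?_⟩
    have e1 : j - (j - l) + u = l + u := by omega
    rw [e1]
    exact hpre u (by omega)

-- in a match at border bstar, no shorter border can have a strictly larger
-- continuation character (otherwise k0 was not minimal at time j)
theorem pvMatchSmall (s : ℕ → Int) (j k0 b bstar : ℕ)
    (hbest : pvBest s j k0)
    (hbs : pvBord s k0 j bstar) (hmatch : s j = s (k0 + bstar))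
    (hb : pvBord s k0 j b) (hlt : b < bstar) : s (k0 + b) ≤ s j := by
  by_contra h
  push_neg at h
  have hpb : pvBord s k0 (k0 + bstar) b := pvBord_prefix_of_lt s k0 j bstar b hbs hb hlt
  have hbsm : bstar < j - k0 := hbs.1
  have hbm : b < j - k0 := hb.1
  have hslt : pvSlt s j (k0 + (bstar - b)) k0 := by
    refine pvSlt_of_char s j (k0 + (bstar - b)) k0 b (by omega) (by omega) ?_ ?_
    · intro u hu
      have := hpb.2 u hu
      have e1 : k0 + bstar - b + u = k0 + (bstar - b) + u := by omega
      rw [e1] at this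
      exact this.symm
    · have e1 : k0 + (bstar - b) + b = k0 + bstar := by omega
      rw [e1, ← hmatch]
      exact h
  exact pvSlt_asymm s j (k0 + (bstar - b)) k0 hslt
    (hbest.2 (k0 + (bstar - b)) (by omega) (by omega))

-- the failure value written in the matched case is the longest border of the
-- extended window
theorem pvNewBrd (s : ℕ → Int) (j k0 k1 L bstar : ℕ)
    (hKL : k1 + L = j) (hL1 : 1 ≤ L) (hbsL : bstar < L)
    (hcopy : ∀ u, u < L → s (k1 + u) = s (k0 + u))
    (HLW : ∀ b, b < L → (pvBord s k0 (k0 + L) b ↔ pvBord s k0 j b))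
    (hmatch : s j = s (k0 + bstar))
    (hbs : pvBord s k0 j bstar)
    (hbig : ∀ b, pvBord s k0 j b → bstar < b → s j ≠ s (k0 + b)) :
    pvBrd s k1 (j + 1) = bstar + 1 := by
  have htrans : ∀ b, b < L → (pvBord s k1 j b ↔ pvBord s k0 j b) := by
    intro b hb
    have h1 : pvBord s k1 (k1 + L) b ↔ pvBord s k0 (k0 + L) b :=
      pvBord_congr s k1 k0 L L b hcopy (le_refl _)
    rw [hKL] at h1
    exact h1.trans (HLW b hb)
  have hmem : pvBord s k1 (j + 1) (bstar + 1) := by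
    have h1 : pvBord s k1 j bstar := (htrans bstar hbsL).2 hbs
    have h2 : s (k1 + bstar) = s j := by
      rw [hcopy bstar hbsL]; exact hmatch.symm
    exact pvBord_succ_intro s k1 j bstar h1 h2 (by omega)
  have hle : pvBrd s k1 (j + 1) ≤ bstar + 1 := by
    by_contra hgt
    push_neg at hgt
    have hbrd : pvBord s k1 (j + 1) (pvBrd s k1 (j + 1)) := pvBrd_bord s k1 (j+1) (by omega)
    obtain ⟨B, hB⟩ : ∃ B, pvBrd s k1 (j + 1) = B + 1 := ⟨pvBrd s k1 (j+1) - 1, by omega⟩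
    rw [hB] at hbrd
    obtain ⟨hB1, hB2⟩ := pvBord_succ_elim s k1 j B hbrd
    have hBL : B < L := by have := hB1.1; omega
    have hB3 : pvBord s k0 j B := (htrans B hBL).1 hB1
    have hB4 : s (k0 + B) = s j := by rw [← hcopy B hBL]; exact hB2
    exact hbig B hB3 (by omega) hB4.symm
  exact le_antisymm hle (pvBrd_is_greatest s k1 (j+1) (bstar+1) hmem)

-- the failure value written in the all-mismatched case: the extended window
-- has no nonempty border
theorem pvNewBrd_mm (s : ℕ → Int) (j k0 k1 L : ℕ)
    (hKL : k1 + L = j) (hL1 : 1 ≤ L)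
    (hcopy : ∀ u, u < L → s (k1 + u) = s (k0 + u))
    (HLW : ∀ b, b < L → (pvBord s k0 (k0 + L) b ↔ pvBord s k0 j b))
    (hbig : ∀ b, pvBord s k0 j b → s j ≠ s (k0 + b)) :
    pvBrd s k1 (j + 1) = 0 := by
  by_contra h0
  have hbrd := pvBrd_bord s k1 (j+1) (by omega)
  obtain ⟨B, hB⟩ : ∃ B, pvBrd s k1 (j + 1) = B + 1 := ⟨pvBrd s k1 (j+1) - 1, by omega⟩
  rw [hB] at hbrd
  obtain ⟨hB1, hB2⟩ := pvBord_succ_elim s k1 j B hbrd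
  have hBL : B < L := by have := hB1.1; omega
  have htr : pvBord s k0 j B := by
    have h1 : pvBord s k1 (k1 + L) B ↔ pvBord s k0 (k0 + L) B :=
      pvBord_congr s k1 k0 L L B hcopy (le_refl _)
    rw [hKL] at h1
    exact (HLW B hBL).1 (h1.1 hB1)
  have hB4 : s (k0 + B) = s j := by rw [← hcopy B hBL]; exact hB2
  exact hbig B htr hB4.symm

-- the heart of the step: the new k beats every other window at time j+1
theorem pvStep_key (s : ℕ → Int) (j k0 k1 L bstar : ℕ)
    (hbest : pvBest s j k0) (hk0 : k0 < j)
    (hKL : k1 + L = j) (hL1 : 1 ≤ L) (hbsL : bstar < L)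
    (hcopy : ∀ u, u < L → s (k1 + u) = s (k0 + u))
    (hkind : k1 = k0 ∨ (pvBord s k0 j L ∧ s j < s (k0 + L)))
    (hcmp : s (k0 + bstar) = s j ∨ (bstar = 0 ∧ s (k0 + bstar) < s j))
    (hsmall : ∀ b, pvBord s k0 j b → b < bstar → s (k0 + b) ≤ s j)
    (hmid : ∀ b, pvBord s k0 j b → bstar < b → b < L → s (k0 + b) < s j) :
    ∀ l, l < j + 1 → l ≠ k1 → pvSlt s (j+1) k1 l := by
  have hk1k0 : k1 ≠ k0 → pvSlt s (j+1) k1 k0 := by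
    intro hne
    rcases hkind with h | ⟨hLb, hLs⟩
    · exact absurd h hne
    · refine pvSlt_of_char s (j+1) k1 k0 L (by omega) (by have := hLb.1; omega)
        (fun u hu => hcopy u hu) ?_
      rw [hKL]; exact hLs
  intro l hl hlne
  by_cases hbord : pvBord s k0 j (j - l)
  · have hlk0 : k0 < l := by have := hbord.1; omega
    set b := j - l with hbdef
    have hlb : l + b = j := by omega
    have hbL : b ≠ L := by
      intro h
      apply hlne
      omega
    have hlchar : ∀ u, u < b → s (k0 + u) = s (l + u) := by
      intro u hu
      have h := hbord.2 u hu
      have e1 : j - b + u = l + u := by omega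
      rwa [e1] at h
    rcases Nat.lt_trichotomy b L with hb | hb | hb
    · rcases Nat.lt_trichotomy b bstar with hbs | hbs | hbs
      · rcases lt_or_eq_of_le (hsmall b hbord hbs) with hcase | hcase
        · refine pvSlt_of_char s (j+1) k1 l b (by omega) (by omega)
            (fun u hu => (hcopy u (by omega)).trans (hlchar u hu)) ?_
          have e2 : l + b = j := hlb
          rw [hcopy b (by omega), e2]
          exact hcase
        · refine pvSlt_of_pref s (j+1) k1 l (by omega) ?_
          intro u hu
          have hub : u ≤ b := by omega
          rcases Nat.lt_or_ge u b with h | h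
          · exact (hcopy u (by omega)).trans (hlchar u h)
          · have hub : u = b := by omega
            rw [hub, hcopy b (by omega), hlb]
            exact hcase
      · rcases hcmp with hc | ⟨h0, hc⟩
        · refine pvSlt_of_pref s (j+1) k1 l (by omega) ?_
          intro u hu
          rcases Nat.lt_or_ge u b with h | h
          · exact (hcopy u (by omega)).trans (hlchar u h)
          · have hub : u = b := by omega
            rw [hub, hcopy b (by omega), hlb, hbs]
            exact hc
        · refine pvSlt_of_char s (j+1) k1 l b (by omega) (by omega)
            (fun u hu => (hcopy u (by omega)).trans (hlchar u hu)) ?_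
          have e2 : l + b = j := hlb
          rw [hcopy b (by omega), e2, hbs]
          exact hc
      · have hcase := hmid b hbord hbs hb
        refine pvSlt_of_char s (j+1) k1 l b (by omega) (by omega)
          (fun u hu => (hcopy u (by omega)).trans (hlchar u hu)) ?_
        have e2 : l + b = j := hlb
        rw [hcopy b (by omega), e2]
        exact hcase
    · exact absurd hb hbL
    · rcases hkind with h | ⟨hLb, hLs⟩
      · exfalso
        have := hbord.1
        omega
      · refine pvSlt_of_char s (j+1) k1 l L (by omega) (by omega)
          (fun u hu => (hcopy u hu).trans (hlchar u (by omega))) ?_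
        have e2 := hlchar L (by omega)
        rw [hKL, ← e2]
        exact hLs
  · by_cases hlk0 : l = k0
    · subst hlk0
      refine hk1k0 (fun h => hlne ?_)
      omega
    · have hlj : l < j := by
        rcases Nat.lt_or_ge l j with h | h
        · exact h
        · exfalso
          apply hbord
          have hlj' : l = j := by omega
          have e : j - l = 0 := by omega
          rw [e]
          exact pvBord_zero s k0 j hk0
      have hnc := pvStep_noncand s j k0 l hbest hlj hlk0 hbord
      rcases hkind with h | ⟨hLb, hLs⟩
      · rw [h]; exact hnc
      · have hne : k1 ≠ k0 := by have := hLb.1; omega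
        exact pvSlt_trans s (j+1) k1 k0 l (hk1k0 hne) hnc

-- ---------- the step ----------

-- extracting the common "final k" data of the two loop-exit scenarios
theorem pvScenario (x : List Int) (j k0N : ℕ) (k' i' : Int)
    (hk0j : k0N < j) (hib : i' < (j : Int) - (k0N : Int) - 1)
    (hinvP : pvInnerInv (pvS x) j k0N k' i') :
    ∃ k1N L : ℕ, k' = (k1N : Int) ∧ k0N ≤ k1N ∧ k1N + L = j ∧ 1 ≤ L ∧ i' + 1 < (L : Int) ∧
      (∀ u, u < L → pvS x (k1N + u) = pvS x (k0N + u)) ∧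
      (∀ b, b < L → (pvBord (pvS x) k0N (k0N + L) b ↔ pvBord (pvS x) k0N j b)) ∧
      (k1N = k0N ∨ (pvBord (pvS x) k0N j L ∧ pvS x j < pvS x (k0N + L))) ∧
      (∀ b, pvBord (pvS x) k0N j b → i' + 1 < (b : Int) → b < L → pvS x (k0N + b) < pvS x j) ∧
      (∀ t, t + 1 ≤ L → pvBrd (pvS x) k0N (k0N + t + 1) = pvBrd (pvS x) k1N (k1N + t + 1)) := by
  have hige : i' = -1 ∨ 0 ≤ i' := by
    rcases hinvP.1 with h | ⟨h, -⟩
    · exact Or.inl h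
    · exact Or.inr h
  rcases hinvP.2.2 with ⟨hkk, hall⟩ | ⟨bm, hbm, hibm, hkk, hsm, hextra⟩
  · refine ⟨k0N, j - k0N, by rw [hkk], le_refl _, by omega, by omega, by omega,
      fun u _ => rfl, ?_, Or.inl rfl, ?_, fun t _ => rfl⟩
    · intro b hb
      rw [show k0N + (j - k0N) = j from by omega]
    · intro b hb h1 h2
      exact hall b hb h1
  · have hbmlt : bm < j - k0N := hbm.1
    have hbm1 : 1 ≤ bm := by omega
    refine ⟨j - bm, bm, by rw [hkk]; omega, by omega, by omega, hbm1, by omega,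
      fun u hu => (hbm.2 u hu).symm, ?_, ?_, ?_, ?_⟩
    · intro b hb
      constructor
      · intro h
        exact pvBord_of_prefix (pvS x) k0N j bm b hbm h
      · intro h
        exact pvBord_prefix_of_lt (pvS x) k0N j bm b hbm h hb
    · right
      exact ⟨hbm, hsm⟩
    · intro b hb h1 h2
      exact hextra b hb h1 h2
    · intro t ht
      have h := pvBrd_congr (pvS x) k0N (j - bm) bm (t + 1) hbm.2 ht
      have e1 : k0N + (t + 1) = k0N + t + 1 := by omega
      have e2 : j - bm + (t + 1) = j - bm + t + 1 := by omega
      rw [e1, e2] at h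
      exact h

-- assembling the outer invariant for the written-back state
theorem pvStep_assemble (x : List Int) (j k1N : ℕ) (fail : List Int) (v : Int) (k1I : Int)
    (hk1I : k1I = (k1N : Int)) (hk1j : k1N < j + 1) (hj : j < 2 * x.length)
    (hflen : fail.length = 2 * x.length)
    (hold : ∀ t, t < j - k1N → fail.getD t 0 = (pvBrd (pvS x) k1N (k1N + t + 1) : Int) - 1)
    (hnew : v = (pvBrd (pvS x) k1N (j + 1) : Int) - 1)
    (hbest : pvBest (pvS x) (j + 1) k1N) :
    pvAInv (pvS x) (2 * x.length) (j + 1) (PySem.List.pySetD fail ((j : Int) - k1I) v, k1I) := by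
  have hidx : (j : Int) - k1I = ((j - k1N : ℕ) : Int) := by rw [hk1I]; omega
  refine ⟨k1N, hk1I, hk1j, ?_, ?_, hbest⟩
  · show (PySem.List.pySetD fail ((j : Int) - k1I) v).length = 2 * x.length
    rw [hidx, pvSetD_length]
    exact hflen
  · intro t ht
    show (PySem.List.pySetD fail ((j : Int) - k1I) v).getD t 0 = _
    rw [hidx, pvSetD_getD fail (j - k1N) v t (by omega)]
    by_cases hte : t = j - k1N
    · rw [if_pos hte, hnew, hte]
      have e : k1N + (j - k1N) + 1 = j + 1 := by omega
      rw [e]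
    · rw [if_neg hte]
      exact hold t (by omega)

theorem pvStepA_inv (x : List Int) (j : ℕ) (st : List Int × Int)
    (hj1 : 1 ≤ j) (hj : j < 2 * x.length)
    (hinv : pvAInv (pvS x) (2 * x.length) j st) :
    pvAInv (pvS x) (2 * x.length) (j+1) (pvStepA (x ++ x) (2 * x.length) st (j : Int)) := by
  obtain ⟨fail, k0I⟩ := st
  obtain ⟨k0N, hk0I, hk0j, hflen, hfailI, hbest⟩ := hinv
  simp only at hk0I hflen hfailI hbest
  subst hk0I
  have hBle := pvBrd_le (pvS x) k0N j
  have hi0 : PySem.List.pyGetD fail ((j : Int) - (k0N : Int) - 1) 0 =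
      (pvBrd (pvS x) k0N j : Int) - 1 := by
    have hjk : (j : Int) - (k0N : Int) - 1 = ((j - k0N - 1 : ℕ) : Int) := by omega
    rw [hjk, PySem.List.pyGetD_natCast]
    have h := hfailI (j - k0N - 1) (by omega)
    have e1 : k0N + (j - k0N - 1) + 1 = j := by omega
    rwa [e1] at h
  have hinv0 : pvInnerInv (pvS x) j k0N ((k0N : ℕ) : Int) ((pvBrd (pvS x) k0N j : Int) - 1) := by
    refine ⟨?_, ?_, ?_⟩
    · rcases Nat.eq_zero_or_pos (pvBrd (pvS x) k0N j) with h0 | hpos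
      · left; rw [h0]; norm_num
      · right
        refine ⟨by omega, ?_⟩
        have e : ((pvBrd (pvS x) k0N j : Int) - 1).toNat + 1 = pvBrd (pvS x) k0N j := by omega
        rw [e]
        exact pvBrd_bord _ _ _ hk0j
    · intro b hb hgtb
      exfalso
      have := pvBrd_is_greatest _ _ _ _ hb
      omega
    · left
      refine ⟨rfl, fun b hb hgtb => ?_⟩
      exfalso
      have := pvBrd_is_greatest _ _ _ _ hb
      omega
  obtain ⟨k', i', heqw, hinvP, hibP, hexit⟩ :=
    pvWhileA_post x j k0N fail (2 * x.length + 2) ((k0N : ℕ) : Int)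
      ((pvBrd (pvS x) k0N j : Int) - 1) hk0j hj hflen hfailI hinv0 (by omega) (by omega)
  simp only [pvStepA]
  rw [pvS_pyGetD x j, hi0, heqw]
  dsimp only
  -- data of the final inner-loop state
  have hige : i' = -1 ∨ 0 ≤ i' := by
    rcases hinvP.1 with h | ⟨h, -⟩
    · exact Or.inl h
    · exact Or.inr h
  obtain ⟨k1N, L, hk1I, hk01, hKL, hL1, hiL, hcopy, HLW, hkind, hmid, hbrdcongr⟩ :=
    pvScenario x j k0N k' i' hk0j hibP hinvP
  set bstar := (i' + 1).toNat with hbsdef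
  have hbstarI : (bstar : Int) = i' + 1 := by omega
  have hbsL : bstar < L := by omega
  have hcont' : PySem.List.pyGetD (x ++ x) (k' + i' + 1) 0 = pvS x (k0N + bstar) := by
    have h1 : k' + i' + 1 = ((k1N + bstar : ℕ) : Int) := by rw [hk1I]; push_cast; omega
    rw [h1, pvS_pyGetD]
    exact hcopy bstar hbsL
  rw [hcont']
  have hbord_bs : pvBord (pvS x) k0N j bstar := by
    rcases hinvP.1 with h | ⟨h0, hbord⟩
    · have e : bstar = 0 := by omega
      rw [e]
      exact pvBord_zero _ _ _ hk0j
    · have e : i'.toNat + 1 = bstar := by omega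
      rwa [e] at hbord
  have hbig : ∀ b, pvBord (pvS x) k0N j b → bstar < b → pvS x j ≠ pvS x (k0N + b) := by
    intro b hb hgtb
    exact hinvP.2.1 b hb (by omega)
  have hmid' : ∀ b, pvBord (pvS x) k0N j b → bstar < b → b < L → pvS x (k0N + b) < pvS x j := by
    intro b hb h1 h2
    exact hmid b hb (by omega) h2
  have hold : ∀ t, t < j - k1N → fail.getD t 0 = (pvBrd (pvS x) k1N (k1N + t + 1) : Int) - 1 := by
    intro t ht
    have h := hfailI t (by omega)
    rw [h, hbrdcongr t (by omega)]
  by_cases hC : pvS x j = pvS x (k0N + bstar)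
  · -- match: the failure value i'+1 is written at j - k'
    rw [if_neg (not_not_intro hC)]
    refine pvStep_assemble x j k1N fail (i' + 1) k' hk1I (by omega) hj hflen hold ?_ ?_
    · rw [pvNewBrd (pvS x) j k0N k1N L bstar hKL hL1 hbsL hcopy HLW hC hbord_bs hbig]
      omega
    · refine ⟨by omega, ?_⟩
      exact pvStep_key (pvS x) j k0N k1N L bstar hbest hk0j hKL hL1 hbsL hcopy hkind
        (Or.inl hC.symm)
        (fun b hb hlt => pvMatchSmall (pvS x) j k0N b bstar hbest hbord_bs hC hb hlt)
        hmid'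
  · -- mismatch: i' must be -1 here
    rw [if_pos hC]
    have hi'neg : i' = -1 := by
      rcases hexit with h | ⟨h0, heqc⟩
      · exact h
      · exfalso
        apply hC
        have e : k0N + i'.toNat + 1 = k0N + bstar := by omega
        rw [← e]
        exact heqc
    have hbs0 : bstar = 0 := by omega
    have hcont0 : PySem.List.pyGetD (x ++ x) k' 0 = pvS x k0N := by
      rw [hk1I, pvS_pyGetD]
      have h2 := hcopy 0 (by omega)
      simpa using h2
    rw [hcont0]
    by_cases hJ : pvS x j < pvS x k0N
    · -- the new element starts the new best window
      rw [if_pos hJ]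
      have hjj : (j : Int) = ((j : ℕ) : Int) := rfl
      refine pvStep_assemble x j j fail (-1) ((j : ℕ) : Int) rfl (by omega) hj hflen
        (fun t ht => absurd ht (by omega)) ?_ ?_
      · have hB : pvBrd (pvS x) j (j + 1) = 0 := by
          unfold pvBrd
          have e : j + 1 - j - 1 = 0 := by omega
          rw [e]
          rfl
        rw [hB]
        norm_num
      · refine ⟨by omega, ?_⟩
        intro l hl hlne
        have hlj : l < j := by omega
        have hjk0 : pvSlt (pvS x) (j + 1) j k0N :=
          pvSlt_of_char _ _ j k0N 0 (by omega) (by omega)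
            (fun u hu => absurd hu (Nat.not_lt_zero u)) (by simpa using hJ)
        by_cases hlk0 : l = k0N
        · rw [hlk0]
          exact hjk0
        · by_cases hbord : pvBord (pvS x) k0N j (j - l)
          · have hb1 : 1 ≤ j - l := by omega
            have h0 := hbord.2 0 (by omega)
            refine pvSlt_of_char (pvS x) (j + 1) j l 0 (by omega) (by omega)
              (fun u hu => absurd hu (Nat.not_lt_zero u)) ?_
            have e1 : j - (j - l) + 0 = l + 0 := by omega
            rw [e1] at h0
            have e2 : j + 0 = j := by omega
            rw [e2, ← h0]
            simpa using hJ
          · exact pvSlt_trans _ _ _ _ _ hjk0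
              (pvStep_noncand _ _ _ _ hbest hlj hlk0 hbord)
    · -- keep k'; all borders mismatched with a larger continuation
      rw [if_neg hJ]
      have hgt : pvS x k0N < pvS x j := by
        refine lt_of_le_of_ne (not_lt.mp hJ) ?_
        intro e
        apply hC
        rw [hbs0]
        simpa using e.symm
      have hbig0 : ∀ b, pvBord (pvS x) k0N j b → pvS x j ≠ pvS x (k0N + b) := by
        intro b hb
        rcases Nat.eq_zero_or_pos b with h0 | hpos
        · rw [h0]
          intro e
          apply hC
          rw [hbs0]
          simpa using e
        · exact hbig b hb (by omega)
      refine pvStep_assemble x j k1N fail (-1) k' hk1I (by omega) hj hflen hold ?_ ?_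
      · rw [pvNewBrd_mm (pvS x) j k0N k1N L hKL hL1 hcopy HLW hbig0]
        norm_num
      · refine ⟨by omega, ?_⟩
        refine pvStep_key (pvS x) j k0N k1N L bstar hbest hk0j hKL hL1 hbsL hcopy hkind
          (Or.inr ⟨hbs0, ?_⟩) (fun b hb hlt => absurd hlt (by omega)) hmid'
        rw [hbs0]
        simpa using hgt


-- ---------- running the outer loop ----------

theorem pvA_best (x : List Int) (hx : x ≠ []) :
    ∃ kN : ℕ, min_string_rotation x = (kN : Int) ∧ pvBest (pvS x) (2 * x.length) kN := by
  have hlen1 : 1 ≤ x.length := by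
    rcases x with _ | ⟨a, t⟩
    · exact absurd rfl hx
    · simp
  have hinit : pvAInv (pvS x) (2 * x.length) 1 (List.replicate (2 * x.length) (-1), 0) := by
    refine ⟨0, rfl, by omega, by simp, ?_, ?_⟩
    · intro t ht
      have ht0 : t = 0 := by omega
      subst ht0
      have h1 : (List.replicate (2 * x.length) (-1 : Int)).getD 0 0 = -1 := by
        have h2 : 0 < 2 * x.length := by omega
        simp [List.getD_eq_getElem?_getD, List.getElem?_replicate, h2]
      rw [h1]
      have h2 : pvBrd (pvS x) 0 (0 + 0 + 1) = 0 := by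
        unfold pvBrd
        norm_num
      rw [h2]
      norm_num
    · exact ⟨by omega, fun l hl hlne => absurd hl (by omega)⟩
  have hiter : ∀ c : ℕ, c ≤ 2 * x.length - 1 →
      pvAInv (pvS x) (2 * x.length) (1 + c)
        (((List.range c).map (fun k : ℕ => 1 + (k : Int))).foldl
          (pvStepA (x ++ x) (2 * x.length)) (List.replicate (2 * x.length) (-1), 0)) := by
    intro c
    induction c with
    | zero => intro _; simpa using hinit
    | succ c ihc =>
      intro hc
      rw [List.range_succ, List.map_append, List.foldl_append]
      simp only [List.map_cons, List.map_nil, List.foldl_cons, List.foldl_nil]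
      have e : (1 : Int) + (c : Int) = ((1 + c : ℕ) : Int) := by push_cast; ring
      rw [e]
      have hstep := pvStepA_inv x (1 + c) _ (by omega) (by omega) (ihc (by omega))
      have e2 : 1 + (c + 1) = (1 + c) + 1 := by omega
      rw [e2]
      exact hstep
  have hfin := hiter (2 * x.length - 1) (le_refl _)
  have e3 : 1 + (2 * x.length - 1) = 2 * x.length := by omega
  rw [e3] at hfin
  obtain ⟨kN, hk, hk2, _, _, hbestf⟩ := hfin
  refine ⟨kN, ?_, hbestf⟩
  show ((PySem.List.pyRange 1 (2 * (x.length : Int)) 1).foldl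
    (pvStepA (x ++ x) (2 * x.length)) (List.replicate (2 * x.length) (-1), 0)).2 = (kN : Int)
  rw [PySem.List.pyRange_one]
  have e4 : ((2 * (x.length : Int) - 1)).toNat = 2 * x.length - 1 := by omega
  rw [e4]
  exact hk

-- ---------- B characterization ----------

def pvRotN (x : List Int) (i : ℕ) : List Int := x.drop i ++ x.take i

theorem pvRot_eq (x : List Int) (i : ℕ) :
    pvRot x ((i : ℕ) : Int) = pvRotN x i := by
  unfold pvRot pvRotN
  rw [PySem.List.slice_from_natCast, PySem.List.slice_to_natCast]

theorem pvRotN_length (x : List Int) (i : ℕ) (hi : i ≤ x.length) :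
    (pvRotN x i).length = x.length := by
  simp [pvRotN]
  omega

theorem pvRotN_getD (x : List Int) (i u : ℕ) (hi : i ≤ x.length) (hu : u < x.length) :
    (pvRotN x i).getD u 0 = pvS x (i + u) := by
  unfold pvRotN pvS
  rw [List.getD_eq_getElem?_getD, List.getD_eq_getElem?_getD]
  rcases Nat.lt_or_ge u (x.length - i) with h | h
  · rw [List.getElem?_append_left (by simp; omega), List.getElem?_drop]
    rw [List.getElem?_append_left (by omega)]
  · rw [List.getElem?_append_right (by simp; omega)]
    rw [List.getElem?_append_right (by omega)]
    have e1 : u - (x.drop i).length = i + u - x.length := by simp; omega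
    rw [e1]
    rw [List.getElem?_take_of_lt (by omega)]

theorem pvS_mod (x : List Int) (t : ℕ) (hx : x ≠ []) (h : t < 2 * x.length) :
    pvS x t = x.getD (t % x.length) 0 := by
  have hlen1 : 1 ≤ x.length := by
    rcases x with _ | ⟨a, s⟩
    · exact absurd rfl hx
    · simp
  unfold pvS
  rw [List.getD_eq_getElem?_getD, List.getD_eq_getElem?_getD]
  rcases Nat.lt_or_ge t x.length with h1 | h1
  · rw [List.getElem?_append_left h1, Nat.mod_eq_of_lt h1]
  · have e : t % x.length = t - x.length := by
      rw [Nat.mod_eq_sub_mod h1, Nat.mod_eq_of_lt (by omega)]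
    rw [e, List.getElem?_append_right h1]

theorem pvRotEq_period (x : List Int) (i i' : ℕ) (hx : x ≠ [])
    (hi : i < x.length) (hi' : i' < x.length) (heq : pvRotN x i = pvRotN x i') :
    ∀ t, i + t < 2 * x.length → i' + t < 2 * x.length → pvS x (i + t) = pvS x (i' + t) := by
  intro t h1 h2
  have hget : (pvRotN x i).getD (t % x.length) 0 = (pvRotN x i').getD (t % x.length) 0 := by
    rw [heq]
  have hm : t % x.length < x.length := Nat.mod_lt _ (by omega)
  rw [pvRotN_getD x i _ (by omega) hm, pvRotN_getD x i' _ (by omega) hm] at hget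
  have key : ∀ a : ℕ, a < x.length → a + t < 2 * x.length →
      pvS x (a + t % x.length) = pvS x (a + t) := by
    intro a ha hat
    rw [pvS_mod x _ hx (by omega), pvS_mod x _ hx hat]
    rw [Nat.add_mod_mod]
  rw [key i hi h1, key i' hi' h2] at hget
  exact hget


theorem pyListLt_total (u v : List Int) (h : u.length = v.length) :
    pyListLt u v = true ∨ pyListLt v u = true ∨ u = v := by
  induction u generalizing v with
  | nil =>
    cases v with
    | nil => right; right; rfl
    | cons b w => simp at h
  | cons a t ih =>
    cases v with
    | nil => simp at h
    | cons b w =>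
      rcases lt_trichotomy a b with hab | hab | hab
      · left; simp [pyListLt, hab]
      · subst hab
        rcases ih w (by simpa using h) with h1 | h1 | h1
        · left; simp [pyListLt, h1]
        · right; left; simp [pyListLt, h1]
        · right; right; rw [h1]
      · have hnab : ¬ a < b := by omega
        right; left
        simp [pyListLt, hab, hnab]


theorem pyListLt_diff (u v : List Int) (h : pyListLt u v = true) (hlen : u.length = v.length) :
    ∃ t, t < u.length ∧ (∀ w, w < t → u.getD w 0 = v.getD w 0) ∧ u.getD t 0 < v.getD t 0 := by
  induction u generalizing v with
  | nil =>
    cases v with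
    | nil => simp [pyListLt] at h
    | cons b w => simp at hlen
  | cons a u' ih =>
    cases v with
    | nil => simp [pyListLt] at h
    | cons b v' =>
      by_cases hab : a < b
      · exact ⟨0, by simp, fun w hw => absurd hw (by omega), by simpa using hab⟩
      · by_cases hba : b < a
        · simp [pyListLt, hab, hba] at h
        · have hab' : a = b := by omega
          subst hab'
          rw [show pyListLt (a :: u') (a :: v') = pyListLt u' v' from by simp [pyListLt]] at h
          obtain ⟨t, h1, h2, h3⟩ := ih v' h (by simpa using hlen)
          refine ⟨t + 1, by simp; omega, ?_, by simpa using h3⟩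
          intro w hw
          cases w with
          | zero => simp
          | succ w' => simpa using h2 w' (by omega)

theorem pvSlt_iff_rot (x : List Int) (i i' : ℕ) (hx : x ≠ [])
    (hi : i < x.length) (hi' : i' < x.length) :
    pvSlt (pvS x) (2 * x.length) i i' ↔
      (pyListLt (pvRotN x i) (pvRotN x i') = true ∨ (pvRotN x i = pvRotN x i' ∧ i < i')) := by
  have hLi : (pvRotN x i).length = x.length := pvRotN_length x i (by omega)
  have hLi' : (pvRotN x i').length = x.length := pvRotN_length x i' (by omega)
  have fwd : ∀ a a' : ℕ, a < x.length → a' < x.length →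
      pyListLt (pvRotN x a) (pvRotN x a') = true → pvSlt (pvS x) (2 * x.length) a a' := by
    intro a a' ha ha' hlt
    obtain ⟨t, ht, hpre, hdiff⟩ := pyListLt_diff _ _ hlt
      (by rw [pvRotN_length x a (by omega), pvRotN_length x a' (by omega)])
    rw [pvRotN_length x a (by omega)] at ht
    refine Or.inl ⟨t, by omega, by omega, ?_, ?_⟩
    · intro w hw
      have h := hpre w hw
      rw [pvRotN_getD x a w (by omega) (by omega), pvRotN_getD x a' w (by omega) (by omega)] at h
      exact h
    · rw [pvRotN_getD x a t (by omega) ht, pvRotN_getD x a' t (by omega) ht] at hdiff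
      exact hdiff
  constructor
  · intro h
    by_cases heq : pvRotN x i = pvRotN x i'
    · right
      refine ⟨heq, ?_⟩
      rcases h with ⟨t, h1, h2, h3, h4⟩ | ⟨hlt, -⟩
      · exfalso
        have := pvRotEq_period x i i' hx hi hi' heq t h1 h2
        omega
      · exact hlt
    · left
      by_contra hnl
      rcases pyListLt_total (pvRotN x i) (pvRotN x i') (by rw [hLi, hLi']) with h1 | h1 | h1
      · exact hnl h1
      · exact pvSlt_asymm _ _ _ _ h (fwd i' i hi' hi h1)
      · exact heq h1
  · rintro (hlt | ⟨heq, hlt⟩)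
    · exact fwd i i' hi hi' hlt
    · refine pvSlt_of_pref _ _ _ _ hlt ?_
      intro u hu
      exact pvRotEq_period x i i' hx hi hi' heq u (by omega) hu

theorem pvB_fold (x : List Int) (hx : x ≠ []) :
    ∀ c : ℕ, c ≤ x.length - 1 →
      ∃ bN : ℕ, ((List.range c).map (fun k : ℕ => 1 + (k : Int))).foldl
          (fun best i => if pyListLt (pvRot x i) (pvRot x best) then i else best) 0 = (bN : Int) ∧
        bN ≤ c ∧ ∀ l, l ≤ c → l ≠ bN → pvSlt (pvS x) (2 * x.length) bN l := by
  have hlen1 : 1 ≤ x.length := by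
    rcases x with _ | ⟨a, t⟩
    · exact absurd rfl hx
    · simp
  intro c
  induction c with
  | zero =>
    intro _
    exact ⟨0, rfl, le_refl _, fun l hl hlne => absurd hl (by omega)⟩
  | succ c ihc =>
    intro hc
    obtain ⟨bN, hb, hbc, hball⟩ := ihc (by omega)
    rw [List.range_succ, List.map_append, List.foldl_append]
    simp only [List.map_cons, List.map_nil, List.foldl_cons, List.foldl_nil]
    rw [hb]
    have e : (1 : Int) + (c : Int) = ((c + 1 : ℕ) : Int) := by push_cast; ring
    rw [e]
    have hbI : ((bN : ℕ) : Int) = (bN : Int) := rfl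
    rw [pvRot_eq, show (bN : Int) = ((bN : ℕ) : Int) from rfl, pvRot_eq]
    have hc1 : c + 1 < x.length := by omega
    by_cases hlt : pyListLt (pvRotN x (c + 1)) (pvRotN x bN) = true
    · rw [if_pos hlt]
      have hslt : pvSlt (pvS x) (2 * x.length) (c + 1) bN :=
        (pvSlt_iff_rot x (c + 1) bN hx hc1 (by omega)).2 (Or.inl hlt)
      refine ⟨c + 1, rfl, le_refl _, fun l hl hlne => ?_⟩
      rcases Nat.lt_or_ge l (c + 1) with h | h
      · by_cases hlb : l = bN
        · rw [hlb]; exact hslt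
        · exact pvSlt_trans _ _ _ _ _ hslt (hball l (by omega) hlb)
      · exact absurd hl (by omega)
    · rw [if_neg hlt]
      have hne : bN ≠ c + 1 := by omega
      have hslt : pvSlt (pvS x) (2 * x.length) bN (c + 1) := by
        rcases pvSlt_total (pvS x) (2 * x.length) bN (c + 1) (by omega) (by omega) hne with h | h
        · exact h
        · exfalso
          rcases (pvSlt_iff_rot x (c + 1) bN hx hc1 (by omega)).1 h with h1 | ⟨h1, h2⟩
          · exact hlt h1
          · omega
      refine ⟨bN, rfl, by omega, fun l hl hlne => ?_⟩
      rcases Nat.lt_or_ge l (c + 1) with h | h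
      · exact hball l (by omega) hlne
      · have hl1 : l = c + 1 := by omega
        rw [hl1]
        exact hslt

theorem pvB_best (x : List Int) (hx : x ≠ []) :
    ∃ kN : ℕ, min_string_rotation_alt x = (kN : Int) ∧ pvBest (pvS x) (2 * x.length) kN := by
  have hlen1 : 1 ≤ x.length := by
    rcases x with _ | ⟨a, t⟩
    · exact absurd rfl hx
    · simp
  obtain ⟨bN, hb, hbc, hball⟩ := pvB_fold x hx (x.length - 1) (le_refl _)
  refine ⟨bN, ?_, ?_⟩
  · show ((PySem.List.pyRange 1 ((x.length : ℕ) : Int) 1).foldl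
      (fun best i => if pyListLt (pvRot x i) (pvRot x best) then i else best) 0) = (bN : Int)
    rw [PySem.List.pyRange_one]
    have e : (((x.length : ℕ) : Int) - 1).toNat = x.length - 1 := by omega
    rw [e]
    exact hb
  · refine ⟨by omega, ?_⟩
    intro l hl hlne
    rcases Nat.lt_or_ge l x.length with h | h
    · exact hball l (by omega) hlne
    · have hst : pvSlt (pvS x) (2 * x.length) (l - x.length) l := by
        refine pvSlt_of_pref _ _ _ _ (by omega) ?_
        intro u hu
        rw [pvS_mod x _ hx (by omega), pvS_mod x _ hx (by omega)]
        have e : l + u = (l - x.length + u) + x.length := by omega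
        rw [e, Nat.add_mod_right]
      by_cases hlb : l - x.length = bN
      · rw [hlb] at hst
        exact hst
      · exact pvSlt_trans _ _ _ _ _ (hball (l - x.length) (by omega) hlb) hst

-- ===== VERDICT (by name: the statement is the Claim_ definition above) =====
theorem min_string_rotation_spec : Claim_equal_min_string_rotation := by
  intro x _
  unfold Spec_min_string_rotation
  by_cases hx : x = []
  · subst hx; decide
  · obtain ⟨ka, hka, hba⟩ := pvA_best x hx
    obtain ⟨kb, hkb, hbb⟩ := pvB_best x hx
    rw [hka, hkb, pvBest_unique (pvS x) (2 * x.length) ka kb hba hbb]
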